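-- pv_equiv track=rewrite | github.com/yavuzff/British-Informatics-Olympiad | BIO2018/BIO2018_2.py | generateLetters
-- ===== SOURCE A (Python) =====
-- def generateLetters(n):
--     alphabet = 'A B C D E F G H I J K L M N O P Q R S T U V W X Y Z'
--     alphabet = alphabet.split()
--
--     letters = ['']*26
--     pointer = 0
--     for i in range (0,26):
--         pointer += (n-1)
--         pointer = pointer % (26-i)
--         letters[i] = alphabet[pointer]
--         alphabet.pop(pointer)
--
--     return letters
-- ===== SOURCE B (Python) =====
-- def generateLetters(n):
--     # Fixed slot table (one slot per letter) with a taken-marker; each round reuses A's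
--     # pointer arithmetic but selects the pointer-th not-yet-taken slot by scanning.
--     slots = [[c, False] for c in 'ABCDEFGHIJKLMNOPQRSTUVWXYZ']
--     letters = []
--     pointer = 0
--     for i in range(26):
--         pointer += (n - 1)
--         pointer = pointer % (26 - i)
--         k = pointer
--         for slot in slots:
--             if not slot[1]:
--                 if k == 0:
--                     letters.append(slot[0])
--                     slot[1] = True
--                     break
--                 k -= 1
--     return letters
-- ===== Notes on version B (the rewrite author's own statement) =====
-- stated objective: alternative
-- what changed: Replaces the shrinking list with pop() by a fixed slot table of the whole alphabet with taken-markers: each round scans the slots counting not-yet-taken letters to select the pointer-th available one.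
import Mathlib
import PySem

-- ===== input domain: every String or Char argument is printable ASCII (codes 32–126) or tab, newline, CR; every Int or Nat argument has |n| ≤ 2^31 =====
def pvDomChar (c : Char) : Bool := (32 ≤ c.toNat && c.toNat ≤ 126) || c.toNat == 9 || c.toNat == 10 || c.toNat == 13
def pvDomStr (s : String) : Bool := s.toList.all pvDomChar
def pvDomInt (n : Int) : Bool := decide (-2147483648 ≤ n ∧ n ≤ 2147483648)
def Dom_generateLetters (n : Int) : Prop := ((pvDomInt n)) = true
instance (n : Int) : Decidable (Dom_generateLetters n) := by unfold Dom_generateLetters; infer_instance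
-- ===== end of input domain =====

-- B keeps the whole alphabet in a fixed slot table with taken-markers and scans for the
-- pointer-th available slot, instead of indexing and popping a shrinking list (alternative decomposition).

-- ===== PORT A =====
-- loop body of A's for-loop; the indices are always in range so the getD/fallback arms are unreachable
def stepA (n : Int) (st : List String × Int × List String) (i : Int) : List String × Int × List String :=
  let pointer := st.2.1 + (n - 1)
  let pointer := PySem.Int.mod pointer (26 - i)
  let letters := st.1.set i.toNat ((PySem.List.pyGet? st.2.2 pointer).getD "")
  let alphabet := match PySem.List.pop? st.2.2 pointer with
    | some r => r.2
    | none => st.2.2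
  (letters, pointer, alphabet)

def generateLetters (n : Int) : List String :=
  let alphabet := PySem.Str.split₀ "A B C D E F G H I J K L M N O P Q R S T U V W X Y Z"
  ((PySem.List.pyRange 0 26 1).foldl (stepA n) (List.replicate 26 "", 0, alphabet)).1

-- ===== PORT B =====
-- the inner `for slot in slots` scan: return the k-th untaken letter (none if the scan
-- falls off the end, as in Python where the loop then just finishes) and the updated slots
def takeKth : List (String × Bool) → Int → Option String × List (String × Bool)
  | [], _ => (none, [])
  | (c, u) :: rest, k =>
    if u then
      let r := takeKth rest k
      (r.1, (c, u) :: r.2)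
    else if k = 0 then
      (some c, (c, true) :: rest)
    else
      let r := takeKth rest (k - 1)
      (r.1, (c, u) :: r.2)

def stepB (n : Int) (st : List String × Int × List (String × Bool)) (i : Int) :
    List String × Int × List (String × Bool) :=
  let pointer := st.2.1 + (n - 1)
  let pointer := PySem.Int.mod pointer (26 - i)
  let r := takeKth st.2.2 pointer
  let letters := match r.1 with
    | some c => st.1 ++ [c]
    | none => st.1
  (letters, pointer, r.2)

def generateLetters_alt (n : Int) : List String :=
  let slots := "ABCDEFGHIJKLMNOPQRSTUVWXYZ".toList.map (fun c => (String.ofList [c], false))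
  ((PySem.List.pyRange 0 26 1).foldl (stepB n) ([], 0, slots)).1

-- ===== PRECONDITION & SPEC =====
def Spec_generateLetters (n : Int) (out : List String) : Prop := out = generateLetters_alt n
instance (n : Int) (out : List String) : Decidable (Spec_generateLetters n out) := by unfold Spec_generateLetters; infer_instance

-- ===== CLAIM (what is proved, stated in full; the proofs are below) =====
def Claim_equal_generateLetters : Prop := ∀ (n : Int), Dom_generateLetters n → Spec_generateLetters n (generateLetters n)

-- ===== LEMMAS AND PROOFS =====

-- the letters still available in B's slot table, in order (= A's current alphabet list)
def avail (slots : List (String × Bool)) : List String :=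
  (slots.filter (fun x => !x.2)).map Prod.fst

theorem takeKth_spec : ∀ (slots : List (String × Bool)) (k : Int), 0 ≤ k →
    k.toNat < (avail slots).length →
    (takeKth slots k).1 = (avail slots)[k.toNat]? ∧
      avail (takeKth slots k).2 = (avail slots).eraseIdx k.toNat := by
  intro slots
  induction slots with
  | nil => intro k hk hlt; simp [avail] at hlt
  | cons hd tl ih =>
    obtain ⟨c, u⟩ := hd
    intro k hk hlt
    cases u with
    | true =>
      have h := ih k hk (by simpa [avail] using hlt)
      simp [takeKth, avail] at h ⊢
      exact h
    | false =>
      by_cases h0 : k = 0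
      · subst h0
        simp [takeKth, avail]
      · have hk1 : (0:Int) ≤ k - 1 := by omega
        have htn : (k - 1).toNat = k.toNat - 1 := by omega
        have hpos : 0 < k.toNat := by omega
        have hlt' : (k - 1).toNat < (avail tl).length := by
          simp [avail] at hlt ⊢; omega
        have h := ih (k - 1) hk1 hlt'
        simp [takeKth, h0, avail, htn] at h ⊢
        constructor
        · rw [h.1]; rw [List.getElem?_cons]
          simp [Nat.pos_iff_ne_zero.mp hpos]
        · rw [h.2]
          cases hkn : k.toNat with
          | zero => omega
          | succ j => simp [List.eraseIdx]

theorem loop_agree (n : Int) : ∀ (m : Nat), m ≤ 26 → ∀ (p : Int) (out : List String)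
    (slots : List (String × Bool)),
    (avail slots).length = m → out.length = 26 - m →
    ((PySem.List.pyRange (26 - (m : Int)) 26 1).foldl (stepA n)
        (out ++ List.replicate m "", p, avail slots)).1
      = ((PySem.List.pyRange (26 - (m : Int)) 26 1).foldl (stepB n) (out, p, slots)).1 := by
  intro m
  induction m with
  | zero =>
    intro _ p out slots _ hout
    rw [PySem.List.pyRange_one_eq_nil (by norm_num)]
    simp
  | succ m ih =>
    intro hm p out slots hlen hout
    have hmc : ((m + 1 : Nat) : Int) = (m : Int) + 1 := by push_cast; ring
    rw [PySem.List.pyRange_one_cons (by omega)]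
    simp only [List.foldl_cons]
    have h26i : (26 : Int) - (26 - ((m + 1 : Nat) : Int)) = ((m + 1 : Nat) : Int) := by ring
    have hpos : (0 : Int) < ((m + 1 : Nat) : Int) := by push_cast; omega
    have hq0 : 0 ≤ PySem.Int.mod (p + (n - 1)) ((m + 1 : Nat) : Int) :=
      PySem.Int.mod_nonneg _ hpos
    have hqlt : PySem.Int.mod (p + (n - 1)) ((m + 1 : Nat) : Int) < ((m + 1 : Nat) : Int) :=
      PySem.Int.mod_lt _ hpos
    set q : Int := PySem.Int.mod (p + (n - 1)) ((m + 1 : Nat) : Int) with hqdef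
    have hqn : q.toNat < (avail slots).length := by rw [hlen]; omega
    obtain ⟨hfst, hsnd⟩ := takeKth_spec slots q hq0 hqn
    have hitn : ((26 : Int) - ((m + 1 : Nat) : Int)).toNat = out.length := by omega
    have hA : stepA n (out ++ List.replicate (m + 1) "", p, avail slots)
        ((26 : Int) - ((m + 1 : Nat) : Int))
        = ((out ++ [(avail slots)[q.toNat]'hqn]) ++ List.replicate m "", q,
            (avail slots).eraseIdx q.toNat) := by
      simp only [stepA, h26i, ← hqdef]
      have hget : PySem.List.pyGet? (avail slots) q = some ((avail slots)[q.toNat]'hqn) :=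
        PySem.List.pyGet?_eq_some_getElem _ hq0 (by omega)
      have hpop : PySem.List.pop? (avail slots) q
          = some ((avail slots)[q.toNat]'hqn, (avail slots).eraseIdx q.toNat) := by
        have h := PySem.List.pop?_natCast _ _ hqn
        rwa [Int.toNat_of_nonneg hq0] at h
      rw [hget, hpop]
      simp only [Option.getD_some]
      rw [hitn, List.replicate_succ, List.set_append_right _ _ (le_refl _)]
      simp
    have hB : stepB n (out, p, slots) ((26 : Int) - ((m + 1 : Nat) : Int))
        = (out ++ [(avail slots)[q.toNat]'hqn], q, (takeKth slots q).2) := by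
      simp only [stepB, h26i, ← hqdef]
      rw [hfst, List.getElem?_eq_getElem hqn]
    rw [hA, hB, ← hsnd]
    have hrange : (26 : Int) - ((m + 1 : Nat) : Int) + 1 = 26 - (m : Int) := by
      push_cast; ring
    rw [hrange]
    exact ih (by omega) q (out ++ [(avail slots)[q.toNat]'hqn]) (takeKth slots q).2
      (by rw [hsnd, List.length_eraseIdx_of_lt hqn, hlen]; omega)
      (by simp [hout]; omega)

-- ===== VERDICT (by name: the statement is the Claim_ definition above) =====
theorem generateLetters_spec : Claim_equal_generateLetters := by
  intro n _
  unfold Spec_generateLetters generateLetters generateLetters_alt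
  have h := loop_agree n 26 (by omega) 0 []
    ("ABCDEFGHIJKLMNOPQRSTUVWXYZ".toList.map (fun c => (String.ofList [c], false)))
    (by decide) (by decide)
  have hal : avail ("ABCDEFGHIJKLMNOPQRSTUVWXYZ".toList.map (fun c => (String.ofList [c], false)))
      = PySem.Str.split₀ "A B C D E F G H I J K L M N O P Q R S T U V W X Y Z" := by decide
  simpa [hal] using h
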